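-- pv_equiv track=rewrite | github.com/SohamLone77/Disaster_Resource_connector | agents/evaluator.py | _prioritize_resources
-- ===== SOURCE A (Python) =====
-- def _prioritize_resources(results: list, plan: dict) -> list:
--     priority = plan.get("priority", "medium")
--
--     if priority == "high":
--         priority_order = ["medical", "shelter", "food", "government"]
--     else:
--         priority_order = ["shelter", "food", "medical", "government"]
--
--     prioritized = []
--     for resource_type in priority_order:
--         for result in results:
--             if result.get("resource_type") == resource_type:
--                 prioritized.append(result)
--
--     return prioritized
-- ===== SOURCE B (Python) =====
-- def _prioritize_resources(results: list, plan: dict) -> list: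
--     # one pass partitioning into the four known categories, then concatenate
--     medical, shelter, food, government = [], [], [], []
--     for r in results:
--         t = r.get("resource_type")
--         if t == "medical":
--             medical.append(r)
--         elif t == "shelter":
--             shelter.append(r)
--         elif t == "food":
--             food.append(r)
--         elif t == "government":
--             government.append(r)
--     if plan.get("priority", "medium") == "high":
--         return medical + shelter + food + government
--     return shelter + food + medical + government
-- ===== Notes on version B (the rewrite author's own statement) =====
-- stated objective: alternative
-- what changed: B partitions results into four category lists in a single pass with four accumulators and then concatenates them in the chosen priority order, instead of A's four full rescans of results.
import Mathlib
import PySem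

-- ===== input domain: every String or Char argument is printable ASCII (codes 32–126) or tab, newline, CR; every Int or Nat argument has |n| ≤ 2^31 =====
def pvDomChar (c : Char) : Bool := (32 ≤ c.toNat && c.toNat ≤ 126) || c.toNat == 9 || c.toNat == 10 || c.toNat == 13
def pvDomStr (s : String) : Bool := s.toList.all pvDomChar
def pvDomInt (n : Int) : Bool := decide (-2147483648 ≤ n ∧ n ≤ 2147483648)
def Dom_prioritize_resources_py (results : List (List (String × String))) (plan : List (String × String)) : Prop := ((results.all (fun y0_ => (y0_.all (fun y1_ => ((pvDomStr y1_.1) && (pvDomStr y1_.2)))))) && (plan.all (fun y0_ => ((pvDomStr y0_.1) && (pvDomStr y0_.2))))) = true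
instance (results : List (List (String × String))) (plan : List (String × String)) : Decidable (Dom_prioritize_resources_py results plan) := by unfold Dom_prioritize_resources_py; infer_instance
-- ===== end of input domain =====

-- B partitions results once into four category accumulators and concatenates them
-- in the chosen priority order, instead of A's four full rescans (alternative).

-- r.get("resource_type") for a result dict r (assoc list, first match)
def pvGetRT (r : List (String × String)) : Option String :=
  (PySem.Dict.mk r).get? "resource_type"

-- ===== PORT A =====
def prioritize_resources_py (results : List (List (String × String))) (plan : List (String × String)) : List (List (String × String)) :=
  let priority := (PySem.Dict.mk plan).getD "priority" "medium"
  let priority_order :=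
    if priority == "high" then ["medical", "shelter", "food", "government"]
    else ["shelter", "food", "medical", "government"]
  priority_order.foldl (fun prioritized resource_type =>
    results.foldl (fun prioritized result =>
      if pvGetRT result == some resource_type then prioritized ++ [result]
      else prioritized) prioritized) []

-- ===== PORT B =====
-- the loop body of B: route one result into the matching accumulator of the 4-tuple
def pvRoute (acc : List (List (String × String)) × List (List (String × String)) × List (List (String × String)) × List (List (String × String)))
    (r : List (String × String)) :
    List (List (String × String)) × List (List (String × String)) × List (List (String × String)) × List (List (String × String)) :=
  let t := pvGetRT r
  if t == some "medical" then (acc.1 ++ [r], acc.2.1, acc.2.2.1, acc.2.2.2)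
  else if t == some "shelter" then (acc.1, acc.2.1 ++ [r], acc.2.2.1, acc.2.2.2)
  else if t == some "food" then (acc.1, acc.2.1, acc.2.2.1 ++ [r], acc.2.2.2)
  else if t == some "government" then (acc.1, acc.2.1, acc.2.2.1, acc.2.2.2 ++ [r])
  else acc

def prioritize_resources_py_alt (results : List (List (String × String))) (plan : List (String × String)) : List (List (String × String)) :=
  let p := results.foldl pvRoute ([], [], [], [])
  if (PySem.Dict.mk plan).getD "priority" "medium" == "high" then
    p.1 ++ p.2.1 ++ p.2.2.1 ++ p.2.2.2
  else p.2.1 ++ p.2.2.1 ++ p.1 ++ p.2.2.2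

-- ===== PRECONDITION & SPEC =====
def Spec_prioritize_resources_py (results : List (List (String × String))) (plan : List (String × String)) (out : List (List (String × String))) : Prop := out = prioritize_resources_py_alt results plan
instance (results : List (List (String × String))) (plan : List (String × String)) (out : List (List (String × String))) : Decidable (Spec_prioritize_resources_py results plan out) := by unfold Spec_prioritize_resources_py; infer_instance

-- ===== CLAIM (what is proved, stated in full; the proofs are below) =====
def Claim_equal_prioritize_resources_py : Prop := ∀ (results : List (List (String × String))) (plan : List (String × String)), Dom_prioritize_resources_py results plan → Spec_prioritize_resources_py results plan (prioritize_resources_py results plan)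

-- ===== LEMMAS AND PROOFS =====

-- A's inner scan is a filter appended to the accumulator.
theorem pv_inner_scan (results acc : List (List (String × String))) (t : String) :
    results.foldl (fun prioritized result =>
      if pvGetRT result == some t then prioritized ++ [result] else prioritized) acc
      = acc ++ results.filter (fun r => pvGetRT r == some t) := by
  induction results generalizing acc with
  | nil => simp
  | cons r rs ih =>
    simp only [List.foldl_cons, List.filter_cons]
    by_cases h : (pvGetRT r == some t) = true
    · rw [if_pos h, ih, List.append_assoc]; simp [h]
    · rw [if_neg h, ih]; simp [h]

-- B's partition fold computes the four filters, each appended to its accumulator.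
theorem pv_partition (results : List (List (String × String)))
    (a b c d : List (List (String × String))) :
    results.foldl pvRoute (a, b, c, d)
      = (a ++ results.filter (fun r => pvGetRT r == some "medical"),
         b ++ results.filter (fun r => pvGetRT r == some "shelter"),
         c ++ results.filter (fun r => pvGetRT r == some "food"),
         d ++ results.filter (fun r => pvGetRT r == some "government")) := by
  induction results generalizing a b c d with
  | nil => simp
  | cons r rs ih =>
    simp only [List.foldl_cons, List.filter_cons, pvRoute]
    by_cases h1 : (pvGetRT r == some "medical") = true
    · have h2 : (pvGetRT r == some "shelter") = false := by
        cases hg : pvGetRT r <;> simp_all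
      have h3 : (pvGetRT r == some "food") = false := by
        cases hg : pvGetRT r <;> simp_all
      have h4 : (pvGetRT r == some "government") = false := by
        cases hg : pvGetRT r <;> simp_all
      simp [h1, h2, h3, h4, ih]
    · by_cases h2 : (pvGetRT r == some "shelter") = true
      · have h3 : (pvGetRT r == some "food") = false := by
          cases hg : pvGetRT r <;> simp_all
        have h4 : (pvGetRT r == some "government") = false := by
          cases hg : pvGetRT r <;> simp_all
        simp [h1, h2, h3, h4, ih]
      · by_cases h3 : (pvGetRT r == some "food") = true
        · have h4 : (pvGetRT r == some "government") = false := by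
            cases hg : pvGetRT r <;> simp_all
          simp [h1, h2, h3, h4, ih]
        · by_cases h4 : (pvGetRT r == some "government") = true
          · simp [h1, h2, h3, h4, ih]
          · simp [h1, h2, h3, h4, ih]

-- ===== VERDICT (by name: the statement is the Claim_ definition above) =====
theorem prioritize_resources_py_spec : Claim_equal_prioritize_resources_py := by
  intro results plan _
  unfold Spec_prioritize_resources_py prioritize_resources_py prioritize_resources_py_alt
  rw [pv_partition]
  by_cases h : ((PySem.Dict.mk plan).getD "priority" "medium" == "high") = true <;>
    simp only [h, if_true, if_false, Bool.false_eq_true, List.foldl_cons, List.foldl_nil,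
      pv_inner_scan] <;> simp
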